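-- pv_equiv track=rewrite | github.com/onigaandreea/collage-stuff | sem4/IA/lab1/ex1.py | ultim
-- ===== SOURCE A (Python) =====
-- def ultim(arr):
--     """
--     Afla ultimul cuvant, din punct de vedere alfabetic, dintr-un text dat
--     Construieste cuvinte pe care le compara pe rand cu un maxim, care se actualizeaza, daca este cazul
--     :param arr: textul din care se afiseza cuvantul cel mai mare
--     :return: cuvantul care din punct de vedere alfabetic este ultimul din text
--     """
--     arr += " "
--     cuv = ""
--     maxi = ""
--     for i in range(len(arr)):
--         if arr[i] != " ":
--             cuv += arr[i]
--         else:
--             if maxi.lower() <= cuv.lower():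
--                 maxi = cuv
--             cuv = ""
--     return maxi
-- ===== SOURCE B (Python) =====
-- def ultim(arr):
--     # Split once on single spaces (keeping empty pieces), stable-sort ascending
--     # by lowercase and take the last element: the last of lowercase-equal words wins,
--     # matching the original's `<=` update rule.
--     return sorted(arr.split(" "), key=str.lower)[-1]
-- ===== Notes on version B (the rewrite author's own statement) =====
-- stated objective: idiomatic
-- what changed: Replaces the character-by-character word builder with a running maximum by one split on the space separator followed by a stable sort on the lowercase key and taking the last element (stability reproduces the <= tie-break).
import Mathlib
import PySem

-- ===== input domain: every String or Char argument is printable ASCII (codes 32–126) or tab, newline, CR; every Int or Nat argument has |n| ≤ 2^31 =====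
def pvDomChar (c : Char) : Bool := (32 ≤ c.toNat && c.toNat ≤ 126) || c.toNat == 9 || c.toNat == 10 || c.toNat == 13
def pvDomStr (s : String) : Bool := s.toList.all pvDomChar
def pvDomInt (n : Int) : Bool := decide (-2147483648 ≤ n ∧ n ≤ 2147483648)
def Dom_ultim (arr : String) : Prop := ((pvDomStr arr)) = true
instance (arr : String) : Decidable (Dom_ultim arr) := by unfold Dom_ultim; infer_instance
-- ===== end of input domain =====

-- B replaces A's character-scan running maximum by split-then-stable-sort-by-lowercase, last element (idiomatic; not faster).

-- ===== PORT A =====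
-- A scans (arr + " ") character by character, accumulating the current word `cuv`
-- and updating the running maximum `maxi` (compared lowercased, `<=` so ties go to
-- the later word) at each space.  The index loop `for i in range(len(arr))` reading
-- arr[i] is transliterated as structural recursion over the character list.
def ultimGo (cs : List Char) (cuv maxi : List Char) : List Char :=
  match cs with
  | [] => maxi
  | c :: rest =>
    if c ≠ ' ' then
      ultimGo rest (cuv ++ [c]) maxi
    else
      ultimGo rest []
        (if String.ofList (PySem.Chars.lower maxi) ≤ String.ofList (PySem.Chars.lower cuv)
         then cuv else maxi)

def ultim (arr : String) : String :=
  String.ofList (ultimGo (arr.toList ++ [' ']) [] [])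

-- ===== PORT B =====
-- B: sorted(arr.split(" "), key=str.lower)[-1].  split? " " is always `some`
-- (the separator is nonempty), and the word list is never empty, so the default
-- of pyGetD is unreachable.
def ultim_alt (arr : String) : String :=
  let words := (PySem.Str.split? arr " ").getD []
  PySem.List.pyGetD (PySem.List.sorted words (fun w => PySem.Str.lower w) false) (-1) ""

-- ===== PRECONDITION & SPEC =====
def Spec_ultim (arr : String) (out : String) : Prop := out = ultim_alt arr
instance (arr : String) (out : String) : Decidable (Spec_ultim arr out) := by unfold Spec_ultim; infer_instance

-- ===== CLAIM (what is proved, stated in full; the proofs are below) =====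
def Claim_equal_ultim : Prop := ∀ (arr : String), Dom_ultim arr → Spec_ultim arr (ultim arr)

-- ===== LEMMAS AND PROOFS =====

-- lowercase of a character chunk, as the String both ports compare with
def lw (p : List Char) : String := String.ofList (PySem.Chars.lower p)

-- A's update step on word chunks
def stepL (m w : List Char) : List Char := if lw m ≤ lw w then w else m

-- the pieces of `pre ++ l` split on single spaces (pre contains no space in use)
def piecesAux (pre : List Char) : List Char → List (List Char)
  | [] => [pre]
  | c :: rest => if c = ' ' then pre :: piecesAux [] rest else piecesAux (pre ++ [c]) rest

-- B's running-maximum step, Option-valued (none = no word seen yet)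
def stepO (acc : Option String) (x : String) : Option String :=
  some (match acc with
        | none => x
        | some m => if PySem.Str.lower m ≤ PySem.Str.lower x then x else m)

theorem piecesAux_ne_nil (pre : List Char) (l : List Char) : piecesAux pre l ≠ [] := by
  induction l generalizing pre with
  | nil => simp [piecesAux]
  | cons c rest ih =>
    by_cases h : c = ' ' <;> simp [piecesAux, h, ih]

theorem splitOn_go_eq (l : List Char) : ∀ (fuel : Nat) (cur : List Char) (acc : List (List Char)),
    l.length ≤ fuel →
    PySem.Chars.splitOn.go [' '] fuel l cur acc = acc.reverse ++ piecesAux cur.reverse l := by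
  induction l with
  | nil =>
    intro fuel cur acc _
    cases fuel <;> simp [PySem.Chars.splitOn.go, piecesAux]
  | cons c rest ih =>
    intro fuel cur acc hf
    cases fuel with
    | zero => simp at hf
    | succ f =>
      by_cases h : c = ' '
      · subst h
        have : PySem.Chars.splitOn.go [' '] (f + 1) (' ' :: rest) cur acc
            = PySem.Chars.splitOn.go [' '] f rest [] (cur.reverse :: acc) := by
          simp [PySem.Chars.splitOn.go, List.isPrefixOf]
        rw [this, ih f [] (cur.reverse :: acc) (by simpa using hf)]
        simp [piecesAux]
      · have : PySem.Chars.splitOn.go [' '] (f + 1) (c :: rest) cur acc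
            = PySem.Chars.splitOn.go [' '] f rest (c :: cur) acc := by
          simp [PySem.Chars.splitOn.go, List.isPrefixOf, Ne.symm h]
        rw [this, ih f (c :: cur) acc (by simpa using hf)]
        simp [piecesAux, h]

theorem splitOn_space (cs : List Char) :
    PySem.Chars.splitOn cs [' '] = piecesAux [] cs := by
  unfold PySem.Chars.splitOn
  simpa using splitOn_go_eq cs (cs.length + 1) [] [] (by omega)

-- A's scan of cs + " " starting with partial word cuv is the fold of stepL over the pieces
theorem ultimGo_eq (cs : List Char) : ∀ (cuv maxi : List Char),
    ultimGo (cs ++ [' ']) cuv maxi = List.foldl stepL maxi (piecesAux cuv cs) := by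
  induction cs with
  | nil =>
    intro cuv maxi
    simp [ultimGo, piecesAux, stepL, lw]
  | cons c rest ih =>
    intro cuv maxi
    by_cases h : c = ' '
    · subst h
      simp only [List.cons_append, ultimGo, piecesAux]
      simp [ih, stepL, lw]
    · simp only [List.cons_append, ultimGo, piecesAux]
      simp [h, ih]

theorem lower_ofList (m : List Char) :
    PySem.Str.lower (String.ofList m) = lw m := by
  have h : (PySem.Str.lower (String.ofList m)).toList = (lw m).toList := by
    rw [PySem.Str.toList_lower]; simp [lw]
  exact String.toList_inj.mp h

theorem empty_le (s : String) : "" ≤ s := by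
  rw [String.le_iff_toList_le]
  rcases s.toList with _ | ⟨c, t⟩
  · exact le_refl _
  · exact le_of_lt (List.nil_lt_cons c t)

theorem getLast?_insertBy (x : String) (s : List String)
    (hp : s.Pairwise (fun a b => PySem.Str.lower a ≤ PySem.Str.lower b)) :
    (PySem.List.insertBy (fun a b => decide (PySem.Str.lower a < PySem.Str.lower b)) x s).getLast?
      = some (match s.getLast? with
              | none => x
              | some m => if PySem.Str.lower m ≤ PySem.Str.lower x then x else m) := by
  induction s with
  | nil => simp [PySem.List.insertBy]
  | cons y t ih =>
    by_cases hxy : PySem.Str.lower x < PySem.Str.lower y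
    · have hins : PySem.List.insertBy (fun a b => decide (PySem.Str.lower a < PySem.Str.lower b)) x (y :: t)
          = x :: y :: t := by simp [PySem.List.insertBy, hxy]
      rw [hins, List.getLast?_cons_cons]
      obtain ⟨m, hm⟩ : ∃ m, (y :: t).getLast? = some m := ⟨(y :: t).getLast (by simp), List.getLast?_eq_some_getLast (h := by simp)⟩
      rw [hm]
      have hym : PySem.Str.lower y ≤ PySem.Str.lower m := by
        rcases List.mem_cons.mp (List.mem_of_getLast? hm) with h | h
        · subst h; exact le_refl _
        · exact (List.pairwise_cons.mp hp).1 m h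
      have : ¬ PySem.Str.lower m ≤ PySem.Str.lower x := by
        intro hle; exact absurd (lt_of_lt_of_le hxy hym) (not_lt.mpr hle)
      simp [this]
    · have hins : PySem.List.insertBy (fun a b => decide (PySem.Str.lower a < PySem.Str.lower b)) x (y :: t)
          = y :: PySem.List.insertBy (fun a b => decide (PySem.Str.lower a < PySem.Str.lower b)) x t := by
        simp [PySem.List.insertBy, hxy]
      have hne : PySem.List.insertBy (fun a b => decide (PySem.Str.lower a < PySem.Str.lower b)) x t ≠ [] := by
        intro hnil
        have : x ∈ ([] : List String) := by
          rw [← hnil]; exact (PySem.List.mem_insertBy _ x x t).mpr (Or.inl rfl)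
        simp at this
      rw [hins]
      obtain ⟨z, zs, hz⟩ := List.exists_cons_of_ne_nil hne
      rw [hz, List.getLast?_cons_cons, ← hz, ih (List.Pairwise.of_cons hp)]
      have hyx : PySem.Str.lower y ≤ PySem.Str.lower x := not_lt.mp hxy
      cases ht : t.getLast? with
      | none =>
        have : t = [] := List.getLast?_eq_none_iff.mp ht
        subst this
        simp [hyx]
      | some m =>
        have htne : t ≠ [] := by intro h; subst h; simp at ht
        obtain ⟨a, as, ha⟩ := List.exists_cons_of_ne_nil htne
        have : (y :: t).getLast? = t.getLast? := by rw [ha, List.getLast?_cons_cons]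
        rw [this, ht]

theorem sorted_getLast? (ws : List String) :
    (PySem.List.sorted ws (fun w => PySem.Str.lower w) false).getLast? = ws.foldl stepO none := by
  induction ws using List.reverseRecOn with
  | nil => simp [PySem.List.sorted_eq_foldl_insertBy]
  | append_singleton t x ih =>
    rw [PySem.List.sorted_eq_foldl_insertBy, List.foldl_append]
    simp only [List.foldl_cons, List.foldl_nil]
    rw [← PySem.List.sorted_eq_foldl_insertBy,
        getLast?_insertBy x _ (PySem.List.sorted_pairwise t (fun w => PySem.Str.lower w)),
        ih, List.foldl_append]
    simp [stepO]

theorem foldl_stepO_map (pt : List (List Char)) : ∀ (m : List Char),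
    List.foldl stepO (some (String.ofList m)) (pt.map String.ofList)
      = some (String.ofList (List.foldl stepL m pt)) := by
  induction pt with
  | nil => intro m; simp
  | cons w wt ih =>
    intro m
    have hstep : stepO (some (String.ofList m)) (String.ofList w) = some (String.ofList (stepL m w)) := by
      simp only [stepO, stepL, lower_ofList]
      split <;> simp
    simp only [List.map_cons, List.foldl_cons, hstep, ih]

theorem ultim_eq_alt (arr : String) : ultim arr = ultim_alt arr := by
  obtain ⟨p, pt, hp⟩ := List.exists_cons_of_ne_nil (piecesAux_ne_nil [] arr.toList)
  -- the word list of B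
  have hsplit : PySem.Str.split? arr " " = some ((piecesAux [] arr.toList).map String.ofList) := by
    have h := PySem.Str.split?_map arr " "
    have hc : PySem.Chars.split? arr.toList [' '] = some (piecesAux [] arr.toList) := by
      simp [PySem.Chars.split?, splitOn_space]
    rw [show (" " : String).toList = [' '] from rfl, hc] at h
    cases hw : PySem.Str.split? arr " " with
    | none => rw [hw] at h; simp at h
    | some ws =>
      rw [hw] at h
      simp only [Option.map_some, Option.some.injEq] at h
      congr 1
      rw [← h, List.map_map]
      simp [Function.comp_def]
  -- A's side reduces to a fold over the pieces
  have hA : ultim arr = String.ofList (List.foldl stepL p pt) := by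
    rw [ultim, ultimGo_eq, hp]
    have h0 : stepL [] p = p := by
      simp only [stepL]
      rw [if_pos]
      show lw [] ≤ lw p
      rw [show lw [] = "" from rfl]
      exact empty_le _
    rw [List.foldl_cons, h0]
  -- B's side
  rw [hA, ultim_alt, hsplit]
  simp only [Option.getD_some]
  have hwne : (piecesAux [] arr.toList).map String.ofList ≠ [] := by
    simp [piecesAux_ne_nil]
  have hsne : PySem.List.sorted ((piecesAux [] arr.toList).map String.ofList)
      (fun w => PySem.Str.lower w) false ≠ [] := by
    rw [Ne, PySem.List.sorted_eq_nil_iff]; exact hwne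
  rw [PySem.List.pyGetD_neg_one _ _ hsne]
  have hlast := sorted_getLast? ((piecesAux [] arr.toList).map String.ofList)
  have hfold : List.foldl stepO none ((piecesAux [] arr.toList).map String.ofList)
      = some (String.ofList (List.foldl stepL p pt)) := by
    rw [hp, List.map_cons, List.foldl_cons,
        show stepO none (String.ofList p) = some (String.ofList p) from rfl, foldl_stepO_map]
  rw [List.getLast?_eq_some_getLast (h := hsne), hfold] at hlast
  exact (Option.some.inj hlast).symm

-- ===== VERDICT (by name: the statement is the Claim_ definition above) =====
theorem ultim_spec : Claim_equal_ultim := by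
  intro arr _
  unfold Spec_ultim
  exact ultim_eq_alt arr
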